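-- pv_equiv track=rewrite | github.com/mikejmorgan-ai/casecraft | claim2_processor.py | determine_supports_undermines
-- ===== SOURCE A (Python) =====
-- def determine_supports_undermines(text, text_lower):
--     """Determine if document supports or undermines Claim 2.
--     RULE 1: Uses BRACKETED PHRASES (multi-word) not single words."""
--     # Phrases that SUPPORT the injunction claim (showing enforcement/harm)
--     # Each is a multi-word phrase or specific legal term of art
--     support_phrases = [
--         'license denied', 'permit denied', 'application denied',
--         'license denial', 'permit denial', 'cannot operate',
--         'cease and desist', 'enforcement action', 'shut down',
--         'not in compliance', 'non-compliance', 'no valid cup',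
--         'without cup', 'without conditional use', 'operating without',
--         'revoke permit', 'revoke license', 'irreparable harm',
--         'ongoing harm', 'ongoing damage', 'ongoing enforcement',
--         'not allowed to', 'prohibited from', 'stop work',
--         'notice of violation', 'code enforcement',
--         'business license denial', 'conditional use eliminated',
--     ]
--
--     # Phrases that UNDERMINE (showing county was reasonable/didn't enforce)
--     undermine_phrases = [
--         'permit approved', 'license approved', 'application granted',
--         'no enforcement action', 'not enforcing', 'will not enforce',
--         'voluntary compliance', 'work together', 'good faith',
--         'accommodate the', 'withdraw enforcement',
--     ]
--
--     support_score = sum(1 for phrase in support_phrases if phrase in text_lower)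
--     undermine_score = sum(1 for phrase in undermine_phrases if phrase in text_lower)
--
--     if support_score > undermine_score + 1:
--         return 'SUPPORTS'
--     elif undermine_score > support_score + 1:
--         return 'UNDERMINES'
--     else:
--         return 'NEUTRAL'
-- ===== SOURCE B (Python) =====
-- # B: multi-pattern text scan. Build a first-character index of all phrases (+1
-- # support / -1 undermine); walk the text once, at each position testing only the
-- # phrases that start with that character via str.startswith, collecting matches
-- # in a set; then tally the signed weights of the distinct phrases found.
-- _PHRASES = [
--     ('license denied', 1), ('permit denied', 1), ('application denied', 1),
--     ('license denial', 1), ('permit denial', 1), ('cannot operate', 1),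
--     ('cease and desist', 1), ('enforcement action', 1), ('shut down', 1),
--     ('not in compliance', 1), ('non-compliance', 1), ('no valid cup', 1),
--     ('without cup', 1), ('without conditional use', 1), ('operating without', 1),
--     ('revoke permit', 1), ('revoke license', 1), ('irreparable harm', 1),
--     ('ongoing harm', 1), ('ongoing damage', 1), ('ongoing enforcement', 1),
--     ('not allowed to', 1), ('prohibited from', 1), ('stop work', 1),
--     ('notice of violation', 1), ('code enforcement', 1),
--     ('business license denial', 1), ('conditional use eliminated', 1),
--     ('permit approved', -1), ('license approved', -1), ('application granted', -1),
--     ('no enforcement action', -1), ('not enforcing', -1), ('will not enforce', -1),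
--     ('voluntary compliance', -1), ('work together', -1), ('good faith', -1),
--     ('accommodate the', -1), ('withdraw enforcement', -1),
-- ]
--
-- _INDEX = {}
-- for _pw in _PHRASES:
--     _INDEX.setdefault(_pw[0][0], []).append(_pw)
--
-- def determine_supports_undermines(text, text_lower):
--     found = set()
--     for i in range(len(text_lower)):
--         for phrase, _w in _INDEX.get(text_lower[i], []):
--             if text_lower.startswith(phrase, i):
--                 found.add(phrase)
--     net = 0
--     for phrase, weight in _PHRASES:
--         if phrase in found:
--             net += weight
--     if net >= 2:
--         return 'SUPPORTS'
--     if net <= -2: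
--         return 'UNDERMINES'
--     return 'NEUTRAL'
-- ===== Notes on version B (the rewrite author's own statement) =====
-- stated objective: alternative
-- what changed: Replaces A's per-phrase substring scans with a single left-to-right walk over the text that tests, at each position, only the phrases listed in a precomputed first-character index, collecting matches in a set and then tallying signed weights (+1/-1) of the distinct phrases found against thresholds 2/-2.
import Mathlib
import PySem

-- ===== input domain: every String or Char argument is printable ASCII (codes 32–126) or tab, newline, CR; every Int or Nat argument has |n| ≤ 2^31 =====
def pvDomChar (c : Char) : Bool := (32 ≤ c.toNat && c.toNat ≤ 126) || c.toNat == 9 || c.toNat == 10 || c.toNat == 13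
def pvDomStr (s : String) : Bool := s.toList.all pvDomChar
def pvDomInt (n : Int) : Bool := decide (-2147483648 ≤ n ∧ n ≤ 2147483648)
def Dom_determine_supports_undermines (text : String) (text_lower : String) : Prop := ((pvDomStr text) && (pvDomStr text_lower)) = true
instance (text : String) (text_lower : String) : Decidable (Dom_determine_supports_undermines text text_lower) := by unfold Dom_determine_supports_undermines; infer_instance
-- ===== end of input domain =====

-- B scans the text once with a first-character phrase index and a found-set
-- instead of A's per-phrase substring tests; return value only, no side effects.

-- ===== PORT A =====
def pvSupportPhrases : List String := [
  "license denied", "permit denied", "application denied",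
  "license denial", "permit denial", "cannot operate",
  "cease and desist", "enforcement action", "shut down",
  "not in compliance", "non-compliance", "no valid cup",
  "without cup", "without conditional use", "operating without",
  "revoke permit", "revoke license", "irreparable harm",
  "ongoing harm", "ongoing damage", "ongoing enforcement",
  "not allowed to", "prohibited from", "stop work",
  "notice of violation", "code enforcement",
  "business license denial", "conditional use eliminated"]

def pvUnderminePhrases : List String := [
  "permit approved", "license approved", "application granted",
  "no enforcement action", "not enforcing", "will not enforce",
  "voluntary compliance", "work together", "good faith",
  "accommodate the", "withdraw enforcement"]

def determine_supports_undermines (text : String) (text_lower : String) : String :=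
  let support_score : Int :=
    (pvSupportPhrases.map (fun phrase => if PySem.Str.isIn phrase text_lower then (1 : Int) else 0)).sum
  let undermine_score : Int :=
    (pvUnderminePhrases.map (fun phrase => if PySem.Str.isIn phrase text_lower then (1 : Int) else 0)).sum
  if support_score > undermine_score + 1 then "SUPPORTS"
  else if undermine_score > support_score + 1 then "UNDERMINES"
  else "NEUTRAL"

-- ===== PORT B =====
def pvPhrases : List (String × Int) := [
  ("license denied", 1), ("permit denied", 1), ("application denied", 1),
  ("license denial", 1), ("permit denial", 1), ("cannot operate", 1),
  ("cease and desist", 1), ("enforcement action", 1), ("shut down", 1),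
  ("not in compliance", 1), ("non-compliance", 1), ("no valid cup", 1),
  ("without cup", 1), ("without conditional use", 1), ("operating without", 1),
  ("revoke permit", 1), ("revoke license", 1), ("irreparable harm", 1),
  ("ongoing harm", 1), ("ongoing damage", 1), ("ongoing enforcement", 1),
  ("not allowed to", 1), ("prohibited from", 1), ("stop work", 1),
  ("notice of violation", 1), ("code enforcement", 1),
  ("business license denial", 1), ("conditional use eliminated", 1),
  ("permit approved", -1), ("license approved", -1), ("application granted", -1),
  ("no enforcement action", -1), ("not enforcing", -1), ("will not enforce", -1),
  ("voluntary compliance", -1), ("work together", -1), ("good faith", -1),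
  ("accommodate the", -1), ("withdraw enforcement", -1)]

-- Source B's module-level first-character index: _INDEX.setdefault(p[0], []).append(pw).
-- Python's 1-character string key p[0] is represented by its Char (exact: the map
-- between 1-char strings and chars is a bijection).
def pvIndex : PySem.Dict Char (List (String × Int)) :=
  pvPhrases.foldl (fun d pw => d.modify (pw.1.toList.headD ' ') [] (· ++ [pw])) PySem.Dict.empty

-- text_lower.startswith(phrase, i) is PySem.Chars.startswith on the i-dropped
-- character list (exact for 0 ≤ i ≤ len); text_lower[i] for i < len is s.getD i ' '.
def determine_supports_undermines_alt (text : String) (text_lower : String) : String :=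
  let s := text_lower.toList
  let found : PySem.Set String :=
    (List.range s.length).foldl
      (fun found i =>
        (pvIndex.getD (s.getD i ' ') []).foldl
          (fun f pw => if PySem.Chars.startswith (List.drop i s) pw.1.toList then PySem.Set.add f pw.1 else f)
          found)
      PySem.Set.empty
  let net : Int := pvPhrases.foldl
    (fun acc pw => if PySem.Set.contains found pw.1 then acc + pw.2 else acc) 0
  if net ≥ 2 then "SUPPORTS" else if net ≤ -2 then "UNDERMINES" else "NEUTRAL"

-- ===== PRECONDITION & SPEC =====
def Spec_determine_supports_undermines (text : String) (text_lower : String) (out : String) : Prop := out = determine_supports_undermines_alt text text_lower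
instance (text : String) (text_lower : String) (out : String) : Decidable (Spec_determine_supports_undermines text text_lower out) := by unfold Spec_determine_supports_undermines; infer_instance

-- ===== CLAIM (what is proved, stated in full; the proofs are below) =====
def Claim_equal_determine_supports_undermines : Prop := ∀ (text : String) (text_lower : String), Dom_determine_supports_undermines text text_lower → Spec_determine_supports_undermines text text_lower (determine_supports_undermines text text_lower)

-- ===== LEMMAS AND PROOFS =====

-- Closed facts about the static table and index (checked by kernel evaluation):
-- every phrase is nonempty and sits in the bucket of its first character.
set_option maxRecDepth 4000 in
theorem pv_table_facts : ∀ pw ∈ pvPhrases,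
    pw.1.toList ≠ [] ∧ pw ∈ pvIndex.getD (pw.1.toList.headD ' ') [] := by decide

-- The weighted table is the support phrases with weight 1 then the undermine ones with -1.
theorem pv_table_eq :
    pvPhrases
      = pvSupportPhrases.map (fun p => (p, (1 : Int)))
        ++ pvUnderminePhrases.map (fun p => (p, (-1 : Int))) := rfl

-- Membership after the inner (bucket) fold.
theorem pv_mem_inner (bkt : List (String × Int)) (cond : String × Int → Bool)
    (acc : PySem.Set String) (x : String) :
    x ∈ bkt.foldl (fun f pw => if cond pw then PySem.Set.add f pw.1 else f) acc
      ↔ x ∈ acc ∨ ∃ pw ∈ bkt, cond pw = true ∧ pw.1 = x := by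
  induction bkt generalizing acc with
  | nil => simp
  | cons hd tl ih =>
    simp only [List.foldl_cons]
    rw [ih]
    by_cases h : cond hd = true
    · simp only [h, if_true, PySem.Set.mem_add, List.mem_cons]
      constructor
      · rintro ((hx | rfl) | ⟨pw, hpw, hc, rfl⟩)
        · exact Or.inl hx
        · exact Or.inr ⟨hd, Or.inl rfl, h, rfl⟩
        · exact Or.inr ⟨pw, Or.inr hpw, hc, rfl⟩
      · rintro (hx | ⟨pw, (rfl | hpw), hc, rfl⟩)
        · exact Or.inl (Or.inl hx)
        · exact Or.inl (Or.inr rfl)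
        · exact Or.inr ⟨pw, hpw, hc, rfl⟩
    · simp only [h, List.mem_cons]
      constructor
      · rintro (hx | ⟨pw, hpw, hc, rfl⟩)
        · exact Or.inl hx
        · exact Or.inr ⟨pw, Or.inr hpw, hc, rfl⟩
      · rintro (hx | ⟨pw, (rfl | hpw), hc, rfl⟩)
        · exact Or.inl hx
        · exact absurd hc h
        · exact Or.inr ⟨pw, hpw, hc, rfl⟩

-- Membership after the outer (position) fold, for any monotone adding step.
theorem pv_mem_outer (l : List Nat) (g : PySem.Set String → Nat → PySem.Set String)
    (C : Nat → String → Prop)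
    (hg : ∀ acc i x, x ∈ g acc i ↔ x ∈ acc ∨ C i x)
    (acc : PySem.Set String) (x : String) :
    x ∈ l.foldl g acc ↔ x ∈ acc ∨ ∃ i ∈ l, C i x := by
  induction l generalizing acc with
  | nil => simp
  | cons hd tl ih =>
    simp only [List.foldl_cons]
    rw [ih]
    simp only [hg, List.mem_cons]
    constructor
    · rintro ((hx | hc) | ⟨i, hi, hc⟩)
      · exact Or.inl hx
      · exact Or.inr ⟨hd, Or.inl rfl, hc⟩
      · exact Or.inr ⟨i, Or.inr hi, hc⟩
    · rintro (hx | ⟨i, (rfl | hi), hc⟩)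
      · exact Or.inl (Or.inl hx)
      · exact Or.inl (Or.inr hc)
      · exact Or.inr ⟨i, hi, hc⟩

-- For every table phrase, membership in B's found set is exactly Python's 'phrase in text_lower'.
theorem pv_found_iff (text_lower : String) (pw : String × Int) (hpw : pw ∈ pvPhrases) :
    (pw.1 ∈ (List.range text_lower.toList.length).foldl
      (fun found i =>
        (pvIndex.getD (text_lower.toList.getD i ' ') []).foldl
          (fun f q => if PySem.Chars.startswith (List.drop i text_lower.toList) q.1.toList then PySem.Set.add f q.1 else f)
          found)
      PySem.Set.empty)
      ↔ PySem.Chars.isIn pw.1.toList text_lower.toList = true := by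
  set s := text_lower.toList with hs
  obtain ⟨hne, hbkt⟩ := pv_table_facts pw hpw
  rw [pv_mem_outer _ _
    (fun i x => ∃ q ∈ pvIndex.getD (s.getD i ' ') [],
      PySem.Chars.startswith (List.drop i s) q.1.toList = true ∧ q.1 = x)
    (fun acc i x => pv_mem_inner _ _ acc x)]
  rw [← PySem.Chars.exists_prefix_drop_iff_isIn]
  constructor
  · rintro (hx | ⟨i, _, q, _, hst, hq⟩)
    · simp [PySem.Set.empty] at hx
    · exact ⟨i, by rw [← hq]; exact (PySem.Chars.startswith_iff _ _).mp hst⟩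
  · rintro ⟨j, hpre⟩
    obtain ⟨t, ht⟩ := hpre
    have hdne : s.drop j ≠ [] := by
      intro hc; rw [← ht] at hc
      exact hne (List.append_eq_nil_iff.mp hc).1
    have hj : j < s.length := by
      by_contra hge
      exact hdne (List.drop_eq_nil_of_le (Nat.le_of_not_lt hge))
    refine Or.inr ⟨j, List.mem_range.mpr hj, pw, ?_, (PySem.Chars.startswith_iff _ _).mpr ⟨t, ht⟩, rfl⟩
    -- the bucket at position j is the bucket of pw's first character
    have hhead : s.getD j ' ' = pw.1.toList.headD ' ' := by
      cases hp : pw.1.toList with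
      | nil => exact absurd hp hne
      | cons c cs =>
        have hdj : s.drop j = c :: (cs ++ t) := by rw [← ht, hp]; simp
        have h0 : s[j]? = some c := by
          have h1 : (List.drop j s)[0]? = s[j + 0]? := List.getElem?_drop
          rw [hdj] at h1; simpa using h1.symm
        rw [List.getD_eq_getElem?_getD, h0]
        rfl
    rw [hhead]; exact hbkt

-- A foldl with a signed-weight accumulator is the sum of the selected weights.
theorem pv_foldl_weight (cond : String × Int → Bool) (l : List (String × Int)) (init : Int) :
    l.foldl (fun acc pw => if cond pw then acc + pw.2 else acc) init
      = init + (l.map (fun pw => if cond pw then pw.2 else 0)).sum := by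
  induction l generalizing init with
  | nil => simp
  | cons hd tl ih =>
    simp only [List.foldl_cons, List.map_cons, List.sum_cons, ih]
    split <;> ring

theorem determine_supports_undermines_spec' (text text_lower : String) :
    determine_supports_undermines text text_lower
      = determine_supports_undermines_alt text text_lower := by
  unfold determine_supports_undermines determine_supports_undermines_alt
  dsimp only
  have hcong : pvPhrases.foldl
      (fun acc pw => if PySem.Set.contains
        ((List.range text_lower.toList.length).foldl
          (fun found i =>
            (pvIndex.getD (text_lower.toList.getD i ' ') []).foldl
              (fun f q => if PySem.Chars.startswith (List.drop i text_lower.toList) q.1.toList then PySem.Set.add f q.1 else f)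
              found)
          PySem.Set.empty) pw.1 then acc + pw.2 else acc) 0
      = pvPhrases.foldl
      (fun acc pw => if PySem.Str.isIn pw.1 text_lower then acc + pw.2 else acc) 0 := by
    apply PySem.List.foldl_congr_mem
    intro acc pw hpw
    have hiff := pv_found_iff text_lower pw hpw
    congr 1
    rw [eq_iff_iff, PySem.Str.isIn_eq]
    constructor
    · intro hc; exact hiff.mp ((PySem.Set.contains_iff _ _).mp hc)
    · intro h; exact (PySem.Set.contains_iff _ _).mpr (hiff.mpr h)
  rw [hcong, pv_foldl_weight, pv_table_eq]
  simp only [List.map_append, List.map_map, List.sum_append, Function.comp_def, zero_add]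
  have hmap : ∀ (l : List String) (w : Int),
      (l.map (fun p => if PySem.Str.isIn p text_lower then w else 0)).sum
        = w * (l.map (fun p => if PySem.Str.isIn p text_lower then (1 : Int) else 0)).sum := by
    intro l w
    induction l with
    | nil => simp
    | cons hd tl ih =>
      simp only [List.map_cons, List.sum_cons, ih]
      split <;> ring
  rw [hmap pvSupportPhrases 1, hmap pvUnderminePhrases (-1)]
  set S := (pvSupportPhrases.map (fun p => if PySem.Str.isIn p text_lower then (1 : Int) else 0)).sum
  set U := (pvUnderminePhrases.map (fun p => if PySem.Str.isIn p text_lower then (1 : Int) else 0)).sum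
  split_ifs <;> first | rfl | omega

-- ===== VERDICT (by name: the statement is the Claim_ definition above) =====
theorem determine_supports_undermines_spec : Claim_equal_determine_supports_undermines := by
  intro text text_lower _
  exact determine_supports_undermines_spec' text text_lower
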